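-- pv_equiv track=rewrite | github.com/roycoding/klackers | klackers.py | combogen
-- ===== SOURCE A (Python) =====
-- import itertools
--
-- def combogen(target, tiles):
--     '''Generate all combinations that sum to 1-9.
--     combogen(int,list of ints) --> list of sets'''
--
--     a = [1,2,3,4,5,6,7,8,9]
--
--     sets = []
--     for subset in itertools.chain(*(itertools.combinations(a, n) for n in range(len(a) + 1))):
--         if sum(subset) == target:
--             sets += [subset]
--
--     used_tiles = set(a) - set(tiles)
--
--     # Test if list contains "used" tiles
--     # return False if found <---
--     def inusedtiles(alist, used_tiles=used_tiles):
--         for anum in alist: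
--             if anum in used_tiles:
--                 return False
--
--         return True
--
--     sets = filter(inusedtiles,sets)
--
--     return sets
-- ===== SOURCE B (Python) =====
-- import itertools
--
-- def combogen(target, tiles):
--     '''Generate all combinations of available tiles that sum to target.
--     combogen(int, list of ints) --> filter of tuples'''
--     ts = set(tiles)
--     allowed = [t for t in range(1, 10) if t in ts]
--     return filter(lambda s: sum(s) == target,
--                   itertools.chain.from_iterable(
--                       itertools.combinations(allowed, n)
--                       for n in range(len(allowed) + 1)))
-- ===== Notes on version B (the rewrite author's own statement) =====
-- stated objective: simpler
-- what changed: B builds the list of available tiles first and enumerates combinations of that list only, returning the sum filter directly, instead of enumerating all subsets of [1..9] into an accumulator list and filtering out subsets containing unavailable tiles afterwards.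
import Mathlib
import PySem

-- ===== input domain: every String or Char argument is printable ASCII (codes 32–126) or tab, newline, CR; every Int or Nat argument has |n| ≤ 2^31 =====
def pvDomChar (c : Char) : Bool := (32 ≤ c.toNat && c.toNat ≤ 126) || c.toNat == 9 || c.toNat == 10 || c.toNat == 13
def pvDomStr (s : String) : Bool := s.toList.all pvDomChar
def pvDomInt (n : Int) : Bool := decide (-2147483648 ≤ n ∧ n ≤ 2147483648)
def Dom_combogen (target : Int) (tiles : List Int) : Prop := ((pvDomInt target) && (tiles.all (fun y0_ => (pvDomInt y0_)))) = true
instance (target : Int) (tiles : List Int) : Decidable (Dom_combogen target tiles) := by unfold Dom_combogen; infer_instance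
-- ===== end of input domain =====

-- B restricts enumeration to the available tiles up front (combinations of `allowed`)
-- instead of enumerating all subsets of [1..9] and filtering by used tiles afterwards (objective: simpler).

-- itertools.combinations(xs, n) in itertools order (shared helper: both Pythons call it)
def combos (n : Nat) (xs : List Int) : List (List Int) :=
  match n, xs with
  | 0, _ => [[]]
  | _ + 1, [] => []
  | n + 1, x :: rest => (combos n rest).map (fun s => x :: s) ++ combos (n + 1) rest

-- ===== PORT A =====
def inusedtiles (alist : List Int) (used : PySem.Set Int) : Bool :=
  match alist with
  | [] => true
  | x :: rest => if PySem.Set.contains used x then false else inusedtiles rest used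

def combogen (target : Int) (tiles : List Int) : List (List Int) :=
  let a : List Int := [1, 2, 3, 4, 5, 6, 7, 8, 9]
  let sets : List (List Int) :=
    ((List.range (a.length + 1)).flatMap (fun n => combos n a)).foldl
      (fun acc s => if s.sum == target then acc ++ [s] else acc) []
  let used : PySem.Set Int := PySem.Set.diff (PySem.Set.ofList a) (PySem.Set.ofList tiles)
  sets.filter (fun s => inusedtiles s used)

-- ===== PORT B =====
def combogen_alt (target : Int) (tiles : List Int) : List (List Int) :=
  let ts : PySem.Set Int := PySem.Set.ofList tiles
  let allowed : List Int := (PySem.List.pyRange 1 10 1).filter (fun t => PySem.Set.contains ts t)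
  ((List.range (allowed.length + 1)).flatMap (fun n => combos n allowed)).filter
    (fun s => s.sum == target)

-- ===== PRECONDITION & SPEC =====
def Spec_combogen (target : Int) (tiles : List Int) (out : List (List Int)) : Prop := out = combogen_alt target tiles
instance (target : Int) (tiles : List Int) (out : List (List Int)) : Decidable (Spec_combogen target tiles out) := by unfold Spec_combogen; infer_instance

-- ===== CLAIM (what is proved, stated in full; the proofs are below) =====
def Claim_equal_combogen : Prop := ∀ (target : Int) (tiles : List Int), Dom_combogen target tiles → Spec_combogen target tiles (combogen target tiles)

-- ===== LEMMAS AND PROOFS =====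

theorem combos_eq_nil_of_lt (n : Nat) (xs : List Int) (h : xs.length < n) : combos n xs = [] := by
  induction xs generalizing n with
  | nil => cases n with
    | zero => omega
    | succ m => simp [combos]
  | cons x rest ih =>
    cases n with
    | zero => omega
    | succ m =>
      simp at h
      simp [combos, ih m (by omega), ih (m + 1) (by omega)]

theorem mem_combos_mem (n : Nat) (xs s : List Int) (hs : s ∈ combos n xs) :
    ∀ x ∈ s, x ∈ xs := by
  induction xs generalizing n s with
  | nil =>
    cases n with
    | zero => simp [combos] at hs; simp [hs]
    | succ m => simp [combos] at hs
  | cons y rest ih =>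
    cases n with
    | zero => simp [combos] at hs; simp [hs]
    | succ m =>
      simp only [combos, List.mem_append, List.mem_map] at hs
      rcases hs with ⟨t, ht, rfl⟩ | hs
      · intro x hx
        rcases List.mem_cons.mp hx with rfl | hx
        · exact List.mem_cons_self
        · exact List.mem_cons_of_mem _ (ih m t ht x hx)
      · intro x hx
        exact List.mem_cons_of_mem _ (ih (m + 1) s hs x hx)

theorem combos_filter (p : Int → Bool) (n : Nat) (xs : List Int) :
    (combos n xs).filter (fun s => s.all p) = combos n (xs.filter p) := by
  induction xs generalizing n with
  | nil => cases n <;> simp [combos]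
  | cons x rest ih =>
    cases n with
    | zero => simp [combos]
    | succ m =>
      by_cases hp : p x = true
      · simp only [combos, List.filter_append, List.filter_map, List.filter_cons, hp, if_pos]
        have : (fun s => (fun s => s.all p) ((fun s => x :: s) s)) = (fun s : List Int => s.all p) := by
          funext s; simp [hp]
        simp only [Function.comp_def, List.all_cons, hp, Bool.true_and]
        rw [ih m, ih (m + 1)]
      · simp only [combos, List.filter_append, List.filter_map, List.filter_cons]
        rw [if_neg hp]
        have hmap : (combos m rest).filter (fun s => (x :: s).all p) = [] := by
          simp [hp]
        simp only [Function.comp_def, List.all_cons, hp, Bool.false_and]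
        simp only [List.filter_false, List.map_nil, List.nil_append]
        exact ih (m + 1)

theorem inusedtiles_congr (s : List Int) (u : PySem.Set Int) (p : Int → Bool)
    (h : ∀ x ∈ s, (!(PySem.Set.contains u x)) = p x) : inusedtiles s u = s.all p := by
  induction s with
  | nil => rfl
  | cons x rest ih =>
    have hx := h x List.mem_cons_self
    have hrest := ih (fun y hy => h y (List.mem_cons_of_mem _ hy))
    simp [inusedtiles, List.all_cons, ← hx, hrest]

theorem filter_flatMap_combogen (l : List Nat) (f : Nat → List (List Int)) (p : List Int → Bool) :
    (l.flatMap f).filter p = l.flatMap (fun n => (f n).filter p) := by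
  induction l with
  | nil => rfl
  | cons n l ih => simp [List.flatMap_cons, List.filter_append, ih]

theorem flatMap_combos_stable (xs : List Int) (j : Nat) :
    (List.range (xs.length + 1 + j)).flatMap (fun n => combos n xs)
      = (List.range (xs.length + 1)).flatMap (fun n => combos n xs) := by
  induction j with
  | zero => rfl
  | succ k ih =>
    have : xs.length + 1 + (k + 1) = (xs.length + 1 + k) + 1 := by omega
    rw [this, List.range_succ, List.flatMap_append, ih]
    simp [combos_eq_nil_of_lt (xs.length + 1 + k) xs (by omega)]

-- ===== VERDICT (by name: the statement is the Claim_ definition above) =====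
theorem combogen_spec : Claim_equal_combogen := by
  intro target tiles _
  show combogen target tiles = combogen_alt target tiles
  unfold combogen combogen_alt
  simp only []
  set a : List Int := [1, 2, 3, 4, 5, 6, 7, 8, 9] with ha
  set p : Int → Bool := fun t => PySem.Set.contains (PySem.Set.ofList tiles) t with hp
  set used : PySem.Set Int := PySem.Set.diff (PySem.Set.ofList a) (PySem.Set.ofList tiles) with hu
  have hrange : (PySem.List.pyRange 1 10 1) = a := by decide
  rw [hrange]
  set allowed : List Int := a.filter p with hallowed
  -- A's fold is an append-filter
  rw [PySem.List.foldl_append_if_eq_filter]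
  simp only [List.nil_append]
  -- commute the two filters on A's side
  rw [List.filter_comm]
  congr 1
  -- the member-filtered enumeration over [1..9] is the enumeration over `allowed`
  rw [filter_flatMap_combogen]
  have hstep : ∀ n : Nat,
      (combos n a).filter (fun s => inusedtiles s used) = combos n allowed := by
    intro n
    have hpt : ∀ x ∈ a, (!(PySem.Set.contains used x)) = p x := by
      intro x hx
      have hx9 : x ∈ PySem.Set.ofList a := (PySem.Set.mem_ofList a x).mpr hx
      rw [hu]
      by_cases hmem : x ∈ tiles
      · have : x ∈ PySem.Set.ofList tiles := (PySem.Set.mem_ofList tiles x).mpr hmem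
        simp [PySem.Set.contains, PySem.Set.diff, hp, hmem]
      · have hnot : x ∉ PySem.Set.ofList tiles := fun h => hmem ((PySem.Set.mem_ofList tiles x).mp h)
        simp [PySem.Set.contains, PySem.Set.diff, hp, hx9]
    have h1 : (combos n a).filter (fun s => inusedtiles s used)
        = (combos n a).filter (fun s => s.all p) := by
      apply List.filter_congr
      intro s hs
      exact inusedtiles_congr s used p (fun x hx => hpt x (mem_combos_mem n a s hs x hx))
    rw [h1, combos_filter]
  have hlen : allowed.length ≤ 9 := by
    calc allowed.length ≤ a.length := List.length_filter_le _ _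
      _ = 9 := by decide
  simp only [hstep]
  have h9 : a.length + 1 = allowed.length + 1 + (9 - allowed.length) := by
    simp only [ha, List.length_cons, List.length_nil]
    omega
  rw [h9]
  exact flatMap_combos_stable allowed (9 - allowed.length)
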